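-- pv_equiv track=rewrite | github.com/Michael-Lizzio/AutoTextAnnotatorAI | main.py | adjust_annotation_position
-- ===== SOURCE A (Python) =====
-- def adjust_annotation_position(y, occupied_positions, annotation_height):
--     if not occupied_positions:  # If no positions are occupied, return original y
--         return y
--     for pos in occupied_positions:
--         if abs(y - pos) < annotation_height:  # Check for overlap
--             return adjust_annotation_position(y + annotation_height, occupied_positions,
--                                               annotation_height)  # Adjust position
--     return y
-- ===== SOURCE B (Python) =====
-- def adjust_annotation_position(y, occupied_positions, annotation_height):
--     h = annotation_height
--     cur = y
--     for pos in sorted(occupied_positions):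
--         if pos - h < cur < pos + h:
--             # jump cur to the smallest y + k*h that clears this position
--             cur += ((pos + h - cur + h - 1) // h) * h
--     return cur
-- ===== Notes on version B (the rewrite author's own statement) =====
-- stated objective: alternative
-- what changed: B sorts the occupied positions once and clears them in a single ascending pass, jumping cur directly to the least y+k*h above each overlapping window with a ceiling division, instead of A's recursion that rescans the whole list after every +h step.
import Mathlib
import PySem

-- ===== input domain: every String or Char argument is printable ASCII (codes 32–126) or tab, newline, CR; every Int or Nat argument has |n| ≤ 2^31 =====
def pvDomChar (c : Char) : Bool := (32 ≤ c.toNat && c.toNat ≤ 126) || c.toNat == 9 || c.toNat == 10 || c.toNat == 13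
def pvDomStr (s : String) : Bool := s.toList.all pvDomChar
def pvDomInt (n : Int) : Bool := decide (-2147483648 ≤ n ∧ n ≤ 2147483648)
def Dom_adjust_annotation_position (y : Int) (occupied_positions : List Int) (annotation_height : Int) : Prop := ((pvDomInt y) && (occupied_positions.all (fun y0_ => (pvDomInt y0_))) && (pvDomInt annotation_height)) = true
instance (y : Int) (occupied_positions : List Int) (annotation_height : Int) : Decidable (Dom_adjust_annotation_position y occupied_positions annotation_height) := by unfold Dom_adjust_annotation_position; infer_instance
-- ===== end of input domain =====

-- B sorts the positions once and clears each in one ascending pass with an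
-- arithmetic jump, instead of A's restart-the-scan recursion (alternative algorithm).

-- ===== PORT A =====
-- termination helper for A's recursion (cited by decreasing_by below)
theorem pv_le_foldr_max (l : List Int) (i : Int) : ∀ p ∈ l, p ≤ l.foldr max i := by
  induction l with
  | nil => intro p hp; cases hp
  | cons a t ih =>
    intro p hp
    rw [List.mem_cons] at hp
    rcases hp with rfl | hp
    · exact le_max_left _ _
    · exact le_trans (ih p hp) (le_max_right _ _)

-- A: if any occupied position overlaps, retry at y + h (the for-loop with an
-- early recursive return is the test "some pos overlaps").
def adjust_annotation_position (y : Int) (occupied_positions : List Int) (annotation_height : Int) : Int :=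
  if occupied_positions = [] then y
  else if occupied_positions.any (fun pos => decide (|y - pos| < annotation_height)) then
    adjust_annotation_position (y + annotation_height) occupied_positions annotation_height
  else y
termination_by (occupied_positions.foldr max 0 + annotation_height - y).toNat
decreasing_by
  rename_i _hne hany
  rw [List.any_eq_true] at hany
  obtain ⟨p, hp, hov⟩ := hany
  have hov' : |y - p| < annotation_height := of_decide_eq_true hov
  have h0 : (0:Int) ≤ |y - p| := abs_nonneg _
  have h1 : y - p < annotation_height := lt_of_abs_lt hov'
  have h2 : p ≤ occupied_positions.foldr max 0 := pv_le_foldr_max _ _ p hp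
  omega

-- ===== PORT B =====
-- one step of B's pass: clear position p by jumping to the least y + k*h ≥ p + h
def pvStepB (h cur p : Int) : Int :=
  if p - h < cur ∧ cur < p + h then
    cur + PySem.Int.floordiv (p + h - cur + h - 1) h * h
  else cur

def adjust_annotation_position_alt (y : Int) (occupied_positions : List Int) (annotation_height : Int) : Int :=
  (PySem.List.sorted occupied_positions (fun x => x) false).foldl (pvStepB annotation_height) y

-- ===== PRECONDITION & SPEC =====
def Spec_adjust_annotation_position (y : Int) (occupied_positions : List Int) (annotation_height : Int) (out : Int) : Prop := out = adjust_annotation_position_alt y occupied_positions annotation_height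
instance (y : Int) (occupied_positions : List Int) (annotation_height : Int) (out : Int) : Decidable (Spec_adjust_annotation_position y occupied_positions annotation_height out) := by unfold Spec_adjust_annotation_position; infer_instance

-- ===== CLAIM (what is proved, stated in full; the proofs are below) =====
def Claim_equal_adjust_annotation_position : Prop := ∀ (y : Int) (occupied_positions : List Int) (annotation_height : Int), Dom_adjust_annotation_position y occupied_positions annotation_height → Spec_adjust_annotation_position y occupied_positions annotation_height (adjust_annotation_position y occupied_positions annotation_height)

-- ===== LEMMAS AND PROOFS =====

-- "y clears every position of l"
def pvFree (h : Int) (l : List Int) (y : Int) : Prop := ∀ p ∈ l, ¬ (|y - p| < h)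

theorem pvA_stop (y : Int) (occ : List Int) (h : Int) (hfree : pvFree h occ y) :
    adjust_annotation_position y occ h = y := by
  rw [adjust_annotation_position.eq_def]
  split
  · rfl
  · rw [if_neg]
    intro hany
    rw [List.any_eq_true] at hany
    obtain ⟨p, hp, hov⟩ := hany
    exact hfree p hp (of_decide_eq_true hov)

theorem pvA_step (y : Int) (occ : List Int) (h : Int) (hov : ¬ pvFree h occ y) :
    adjust_annotation_position y occ h = adjust_annotation_position (y + h) occ h := by
  have hne : occ ≠ [] := by rintro rfl; exact hov (by intro p hp; cases hp)
  have hany : occ.any (fun pos => decide (|y - pos| < h)) = true := by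
    rw [List.any_eq_true]
    simp only [pvFree, not_forall] at hov
    obtain ⟨p, hp, hpov⟩ := hov
    exact ⟨p, hp, decide_eq_true (not_not.mp hpov)⟩
  conv_lhs => rw [adjust_annotation_position.eq_def]
  rw [if_neg hne, if_pos hany]

theorem pvA_char (occ : List Int) (h : Int) (k : ℕ) :
    ∀ y : Int, pvFree h occ (y + k * h) → (∀ j : ℕ, j < k → ¬ pvFree h occ (y + j * h)) →
    adjust_annotation_position y occ h = y + k * h := by
  induction k with
  | zero =>
    intro y hfree _
    simpa using pvA_stop y occ h (by simpa using hfree)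
  | succ k ih =>
    intro y hfree hbad
    have h0 : ¬ pvFree h occ y := by
      have := hbad 0 (Nat.succ_pos k); simpa using this
    rw [pvA_step y occ h h0]
    have : adjust_annotation_position (y + h) occ h = (y + h) + k * h := by
      apply ih
      · have : y + h + k * h = y + (k + 1 : ℕ) * h := by push_cast; ring
        rw [this]; exact hfree
      · intro j hj
        have : y + h + j * h = y + (j + 1 : ℕ) * h := by push_cast; ring
        rw [this]
        exact hbad (j + 1) (by omega)
    rw [this]; push_cast; ring

-- if cur is at or below every window bottom, B's pass never moves it
theorem pvFold_frozen (h : Int) (s : List Int) : ∀ cur : Int,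
    (∀ p ∈ s, cur ≤ p - h) → s.foldl (pvStepB h) cur = cur := by
  induction s with
  | nil => intro cur _; rfl
  | cons p t ih =>
    intro cur hlo
    have hstep : pvStepB h cur p = cur := by
      unfold pvStepB
      rw [if_neg]
      rintro ⟨h1, _⟩
      have := hlo p (List.mem_cons_self) -- cur ≤ p - h
      omega
    rw [List.foldl_cons, hstep]
    exact ih cur (fun q hq => hlo q (List.mem_cons_of_mem _ hq))

-- main invariant of B's ascending pass (h > 0, list sorted)
theorem pvFold_inv (h : Int) (hpos : 0 < h) (s : List Int) :
    ∀ cur : Int, s.Pairwise (· ≤ ·) →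
    (∃ k : ℕ, s.foldl (pvStepB h) cur = cur + k * h) ∧
    (∀ p ∈ s, ¬ (|s.foldl (pvStepB h) cur - p| < h)) ∧
    (∀ j : ℕ, cur + j * h < s.foldl (pvStepB h) cur → ∃ p ∈ s, |cur + j * h - p| < h) := by
  induction s with
  | nil =>
    intro cur _
    refine ⟨⟨0, by simp⟩, by simp, ?_⟩
    intro j hj
    simp only [List.foldl_nil] at hj
    exfalso
    have : (0:Int) ≤ j * h := by positivity
    omega
  | cons p t ih =>
    intro cur hsort
    have hpt : ∀ q ∈ t, p ≤ q := (List.pairwise_cons.mp hsort).1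
    have hts : t.Pairwise (· ≤ ·) := (List.pairwise_cons.mp hsort).2
    by_cases hc : p - h < cur ∧ cur < p + h
    · -- overlap: jump
      set q := PySem.Int.floordiv (p + h - cur + h - 1) h with hqdef
      have hstep : pvStepB h cur p = cur + q * h := by
        unfold pvStepB; rw [if_pos hc]
      have hq : q = (p + h - cur + h - 1) / h := by
        rw [hqdef, PySem.Int.floordiv_eq_ediv_of_pos hpos]
      -- bracket facts about q, stated on the atom q * h
      have heuc := Int.ediv_add_emod (p + h - cur + h - 1) h
      have he0 := Int.emod_nonneg (p + h - cur + h - 1) (ne_of_gt hpos)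
      have he1 := Int.emod_lt_of_pos (p + h - cur + h - 1) hpos
      have hd1 : q * h ≤ p + h - cur + h - 1 := by
        rw [hq, mul_comm]; omega
      have hd2 : p + h - cur + h - 1 < q * h + h := by
        rw [hq, mul_comm]; omega
      have hge : p + h ≤ cur + q * h := by omega
      have hlt : cur + q * h - h < p + h := by omega
      have hq1 : 1 ≤ q := by nlinarith [hge, hc.2]
      obtain ⟨hk, hfree, hskip⟩ := ih (cur + q * h) hts
      obtain ⟨k, hkeq⟩ := hk
      rw [List.foldl_cons, hstep]
      set r := t.foldl (pvStepB h) (cur + q * h) with hrdef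
      have hrge : cur + q * h ≤ r := by
        rw [hkeq]
        have : (0:Int) ≤ k * h := by positivity
        omega
      refine ⟨⟨q.toNat + k, by rw [hkeq]; push_cast; rw [Int.toNat_of_nonneg (by omega)]; ring⟩, ?_, ?_⟩
      · intro p' hp'
        rw [List.mem_cons] at hp'
        rcases hp' with rfl | hp'
        · -- head p: r ≥ cur + q*h ≥ p + h
          intro habs
          have := lt_of_abs_lt habs
          have := neg_lt_of_abs_lt habs
          omega
        · exact hfree p' hp'
      · intro j hj
        by_cases hjq : cur + j * h < cur + q * h
        · -- skipped by this jump: overlaps p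
          refine ⟨p, List.mem_cons_self, ?_⟩
          have hjlt : (j:Int) < q := by
            have : (j:Int) * h < q * h := by omega
            exact lt_of_mul_lt_mul_right this (le_of_lt hpos)
          have hub : cur + j * h ≤ cur + q * h - h := by nlinarith [hjlt]
          have hj0 : (0:Int) ≤ (j:Int) * h := by positivity
          rw [abs_lt]
          constructor
          · omega
          · omega
        · -- skipped later: use IH with shifted index
          push_neg at hjq
          have hjq' : q ≤ (j:Int) := by
            have : q * h ≤ (j:Int) * h := by omega
            exact le_of_mul_le_mul_right this hpos
          have hrew : cur + j * h = (cur + q * h) + ((j:Int) - q).toNat * h := by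
            rw [Int.toNat_of_nonneg (by omega)]; ring
          obtain ⟨p', hp', hov⟩ := hskip ((j:Int) - q).toNat (by rw [← hrew]; exact hj)
          exact ⟨p', List.mem_cons_of_mem _ hp', by rwa [← hrew] at hov⟩
    · -- no overlap with head
      have hstep : pvStepB h cur p = cur := by unfold pvStepB; rw [if_neg hc]
      rw [List.foldl_cons, hstep]
      rcases (not_and_or.mp hc) with hlow | hhigh
      · -- cur ≤ p - h: frozen for the whole tail
        push_neg at hlow
        have hfr : t.foldl (pvStepB h) cur = cur := by
          apply pvFold_frozen
          intro q hq
          have := hpt q hq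
          omega
        rw [hfr]
        refine ⟨⟨0, by simp⟩, ?_, ?_⟩
        · intro p' hp'
          rw [List.mem_cons] at hp'
          rcases hp' with rfl | hp'
          · rw [abs_lt]; push_neg; intro _; omega
          · have := hpt p' hp'; rw [abs_lt]; push_neg; intro _; omega
        · intro j hj
          exfalso
          have : (0:Int) ≤ j * h := by positivity
          omega
      · -- cur ≥ p + h
        push_neg at hhigh
        obtain ⟨hk, hfree, hskip⟩ := ih cur hts
        obtain ⟨k, hkeq⟩ := hk
        refine ⟨⟨k, hkeq⟩, ?_, ?_⟩
        · intro p' hp'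
          rw [List.mem_cons] at hp'
          rcases hp' with rfl | hp'
          · have hrge : cur ≤ t.foldl (pvStepB h) cur := by
              rw [hkeq]
              have : (0:Int) ≤ k * h := by positivity
              omega
            rw [abs_lt]; push_neg; intro _; omega
          · exact hfree p' hp'
        · intro j hj
          obtain ⟨p', hp', hov⟩ := hskip j hj
          exact ⟨p', List.mem_cons_of_mem _ hp', hov⟩

theorem pvB_nonpos (y : Int) (occ : List Int) (h : Int) (hnp : h ≤ 0) :
    adjust_annotation_position_alt y occ h = y := by
  unfold adjust_annotation_position_alt
  generalize (PySem.List.sorted occ (fun x => x) false) = s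
  induction s generalizing y with
  | nil => rfl
  | cons p t ih =>
    have hstep : pvStepB h y p = y := by
      unfold pvStepB; rw [if_neg]; rintro ⟨h1, h2⟩; omega
    rw [List.foldl_cons, hstep]
    exact ih y

theorem pv_main (y : Int) (occ : List Int) (h : Int) :
    adjust_annotation_position y occ h = adjust_annotation_position_alt y occ h := by
  by_cases hpos : 0 < h
  · have hmem : ∀ p : Int, p ∈ PySem.List.sorted occ (fun x : Int => x) false ↔ p ∈ occ := by
      intro p
      exact PySem.List.mem_sorted (xs := occ) (key := fun x : Int => x) (rev := false) p
    have hsort : (PySem.List.sorted occ (fun x : Int => x) false).Pairwise (· ≤ ·) := by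
      have := PySem.List.sorted_pairwise (xs := occ) (key := fun x : Int => x)
      simpa using this
    obtain ⟨⟨k, hkeq⟩, hfree, hskip⟩ := pvFold_inv h hpos _ y hsort
    unfold adjust_annotation_position_alt
    rw [hkeq]
    apply pvA_char occ h k y
    · intro p hp
      have := hfree p ((hmem p).mpr hp)
      rwa [hkeq] at this
    · intro j hj hfr
      have hlt : y + j * h < y + k * h := by
        have : (j:Int) * h < k * h := by
          have : (j:Int) < k := by exact_mod_cast hj
          exact mul_lt_mul_of_pos_right this hpos
        omega
      rw [← hkeq] at hlt
      obtain ⟨p, hp, hov⟩ := hskip j hlt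
      exact hfr p ((hmem p).mp hp) hov
  · push_neg at hpos
    rw [pvB_nonpos y occ h hpos]
    apply pvA_stop
    intro p hp habs
    have := abs_nonneg (y - p)
    omega

-- ===== VERDICT (by name: the statement is the Claim_ definition above) =====
theorem adjust_annotation_position_spec : Claim_equal_adjust_annotation_position := by
  intro y occ h _
  unfold Spec_adjust_annotation_position
  exact pv_main y occ h
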